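-- pv_equiv track=rewrite | github.com/matheushnobre/treinamento-maratona-programacao | beecrowd/python/grafos/ex2230.py | bfs
-- ===== SOURCE A (Python) =====
-- def bfs(o, g, v, p):
--     visitados = [0] * v
--     visitados[o] = 1
--     fila = [o]
--
--     distancia = [-1] * v
--     distancia[o] = 0
--
--     while len(fila) != 0:
--         v_atual = fila[0]
--         del fila[0]
--
--         for vz in range(v):
--             if visitados[vz] == 0 and g[v_atual][vz] == 1:
--                 visitados[vz] = 1
--                 distancia[vz] = distancia[v_atual] + 1
--                 fila.append(vz)
--
--     retorno = [i+1 for i in range(v) if 0 < distancia[i] <= p]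
--     return retorno
-- ===== SOURCE B (Python) =====
-- def bfs(o, g, v, p):
--     dist = [-1] * v
--     dist[o] = 0
--     frontier = [o]
--     d = 0
--     while frontier:
--         d += 1
--         nxt = []
--         for u in frontier:
--             row = g[u]
--             for w in range(v):
--                 if dist[w] == -1 and row[w] == 1:
--                     dist[w] = d
--                     nxt.append(w)
--         frontier = nxt
--     return [i + 1 for i in range(v) if 0 < dist[i] <= p]
-- ===== Notes on version B (the rewrite author's own statement) =====
-- stated objective: alternative
-- what changed: Replaces A's FIFO-queue BFS with per-vertex distance writes (dist[w]=dist[u]+1) and a separate visited array by a level-synchronous BFS: whole frontier lists advanced one level at a time, distances taken from a level counter, and the distance array itself (dist[w]==-1) serving as the visited mark, with no queue front-deletion.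
-- outside the precondition, e.g. on bfs(0, [], 1, 1): A returns [], B raises IndexError; on bfs(0, [[0, 0], [0]], 2, 1): A returns [], B returns []
import Mathlib
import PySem

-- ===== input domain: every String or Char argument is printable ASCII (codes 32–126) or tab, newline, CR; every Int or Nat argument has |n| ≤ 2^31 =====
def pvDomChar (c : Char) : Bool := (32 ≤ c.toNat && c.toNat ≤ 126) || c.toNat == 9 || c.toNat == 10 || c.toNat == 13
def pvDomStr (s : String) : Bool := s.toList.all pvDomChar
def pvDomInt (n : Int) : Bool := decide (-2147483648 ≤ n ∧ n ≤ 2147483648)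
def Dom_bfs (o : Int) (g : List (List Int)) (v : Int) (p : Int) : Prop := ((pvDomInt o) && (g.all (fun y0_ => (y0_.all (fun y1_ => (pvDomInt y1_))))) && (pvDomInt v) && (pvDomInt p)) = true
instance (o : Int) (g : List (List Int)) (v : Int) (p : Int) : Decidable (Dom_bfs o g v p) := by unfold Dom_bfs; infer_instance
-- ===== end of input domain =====

-- B re-implements the same BFS report as a level-synchronous sweep: no visited array (the distance
-- array doubles as the visited mark), no FIFO queue with O(n) front deletion (whole frontier lists
-- advanced a level at a time, distances taken from the level counter). Objective: alternative.

-- ===== PORT A =====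
-- the body of A's inner 'for vz in range(v)' loop; state = (visitados, distancia, fila)
def bfsStepA (g : List (List Int)) (u : Int) (s : List Int × List Int × List Int) (vz : Int) :
    List Int × List Int × List Int :=
  if PySem.List.pyGetD s.1 vz 0 = 0 ∧ PySem.List.pyGetD (PySem.List.pyGetD g u []) vz 0 = 1 then
    (PySem.List.pySetD s.1 vz 1,
     PySem.List.pySetD s.2.1 vz (PySem.List.pyGetD s.2.1 u 0 + 1),
     s.2.2 ++ [vz])
  else s

-- A's 'while len(fila) != 0' loop; the fuel v.toNat is a totality guard only: each iteration pops
-- one queue element and every enqueued element marks one fresh vertex visited, so ≤ v iterations run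
def bfsLoopA (g : List (List Int)) (v : Int) : Nat → List Int → List Int → List Int → List Int
  | 0, _, _, dist => dist
  | _ + 1, [], _, dist => dist
  | n + 1, u :: fila, vis, dist =>
      let s := (PySem.List.pyRange 0 v).foldl (bfsStepA g u) (vis, dist, fila)
      bfsLoopA g v n s.2.2 s.1 s.2.1

def bfs (o : Int) (g : List (List Int)) (v : Int) (p : Int) : List Int :=
  let vis := PySem.List.pySetD (List.replicate v.toNat 0) o 1
  let dist0 := PySem.List.pySetD (List.replicate v.toNat (-1)) o 0
  let dist := bfsLoopA g v v.toNat [o] vis dist0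
  ((PySem.List.pyRange 0 v).filter
      (fun i => decide (0 < PySem.List.pyGetD dist i 0 ∧ PySem.List.pyGetD dist i 0 ≤ p))).map
    (fun i => i + 1)

-- ===== PORT B =====
-- the body of B's inner 'for w in range(v)' loop; state = (dist, nxt); d is the current level
def bfsAltStep (row : List Int) (d : Int) (s : List Int × List Int) (w : Int) :
    List Int × List Int :=
  if PySem.List.pyGetD s.1 w 0 = -1 ∧ PySem.List.pyGetD row w 0 = 1 then
    (PySem.List.pySetD s.1 w d, s.2 ++ [w])
  else s

-- B's 'for u in frontier' loop
def bfsAltLevel (g : List (List Int)) (v : Int) (d : Int) (s : List Int × List Int)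
    (frontier : List Int) : List Int × List Int :=
  frontier.foldl (fun s u => (PySem.List.pyRange 0 v).foldl (bfsAltStep (PySem.List.pyGetD g u []) d) s) s

-- B's 'while frontier' loop; fuel v.toNat is a totality guard only: every level that recurses has
-- discovered at least one fresh vertex, so ≤ v levels run
def bfsAltLoop (g : List (List Int)) (v : Int) : Nat → List Int → Int → List Int → List Int
  | 0, _, _, dist => dist
  | _ + 1, [], _, dist => dist
  | n + 1, frontier, d, dist =>
      let s := bfsAltLevel g v (d + 1) (dist, []) frontier
      bfsAltLoop g v n s.2 (d + 1) s.1

def bfs_alt (o : Int) (g : List (List Int)) (v : Int) (p : Int) : List Int :=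
  let dist0 := PySem.List.pySetD (List.replicate v.toNat (-1)) o 0
  let dist := bfsAltLoop g v v.toNat [o] 0 dist0
  ((PySem.List.pyRange 0 v).filter
      (fun i => decide (0 < PySem.List.pyGetD dist i 0 ∧ PySem.List.pyGetD dist i 0 ≤ p))).map
    (fun i => i + 1)

-- ===== PRECONDITION & SPEC =====
-- Pre_ admits the natural domain: an origin Python indexes without IndexError (-v ≤ o < v, so both
-- programs use the same wrapped vertex) and an adjacency matrix with at least v rows whose first v
-- rows have at least v entries.  It excludes the raising inputs (v < 1, o out of range, missing
-- rows/entries that get accessed) and, with them, ragged matrices on which A happens to return only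
-- because its lazy row accesses never reach the short row — whether A raises there depends on
-- reachability, which is not a closed-form condition (see cites; B always reads g[u] for a reached u).
def Pre_bfs (o : Int) (g : List (List Int)) (v : Int) (p : Int) : Prop :=
  1 ≤ v ∧ -v ≤ o ∧ o < v ∧ v ≤ (g.length : Int) ∧
    ∀ row ∈ g.take v.toNat, v ≤ (row.length : Int)
instance (o : Int) (g : List (List Int)) (v : Int) (p : Int) : Decidable (Pre_bfs o g v p) := by
  unfold Pre_bfs; infer_instance

def pvWitness_bfs : Int × List (List Int) × Int × Int := (0, [[0, 1], [1, 0]], 2, 1)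

def Spec_bfs (o : Int) (g : List (List Int)) (v : Int) (p : Int) (out : List Int) : Prop :=
  out = bfs_alt o g v p
instance (o : Int) (g : List (List Int)) (v : Int) (p : Int) (out : List Int) :
    Decidable (Spec_bfs o g v p out) := by unfold Spec_bfs; infer_instance

-- ===== CLAIM (what is proved, stated in full; the proofs are below) =====
def Claim_equal_bfs : Prop := ∀ (o : Int) (g : List (List Int)) (v : Int) (p : Int),
  Dom_bfs o g v p → Pre_bfs o g v p → Spec_bfs o g v p (bfs o g v p)

-- ===== LEMMAS AND PROOFS =====

-- the position a Python index i addresses in a list of length V (defined for -V ≤ i < V)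
def nrmN (V : Nat) (i : Int) : Nat := if 0 ≤ i then i.toNat else V - (-i).toNat

-- A's visited array as a function of the distance array: 1 exactly where a distance is known
def maskL (dist : List Int) : List Int := dist.map (fun x => if x = -1 then 0 else 1)

-- number of still-undiscovered cells
def cntN (dist : List Int) : Nat := dist.countP (fun x => decide (x = -1))

-- frontier invariant: members address a cell (possibly via a negative index) holding level d
def GoodF (V : Nat) (dist : List Int) (d : Int) (f : List Int) : Prop :=
  ∀ u ∈ f, -(V : Int) ≤ u ∧ u < (V : Int) ∧ dist.getD (nrmN V u) 0 = d

-- next-frontier invariant: members are nonnegative and hold level e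
def GoodN (V : Nat) (dist : List Int) (e : Int) (ws : List Int) : Prop :=
  ∀ w ∈ ws, 0 ≤ w ∧ w < (V : Int) ∧ dist.getD w.toNat 0 = e

theorem nrmN_of_nonneg (V : Nat) {i : Int} (h : 0 ≤ i) : nrmN V i = i.toNat := by
  simp [nrmN, h]

theorem nrmN_lt {V : Nat} {i : Int} (h1 : -(V : Int) ≤ i) (h2 : i < (V : Int)) : nrmN V i < V := by
  unfold nrmN; split <;> omega

theorem pyGetD_nrm {xs : List Int} {V : Nat} {i : Int} (d : Int) (hlen : xs.length = V)
    (h1 : -(V : Int) ≤ i) (h2 : i < (V : Int)) :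
    PySem.List.pyGetD xs i d = xs.getD (nrmN V i) d := by
  unfold nrmN
  simp only [PySem.List.pyGetD, PySem.List.pyGet?, PySem.List.pyIdx?, hlen]
  split_ifs with h3 <;> simp_all

theorem pySetD_nrm {xs : List Int} {V : Nat} {i : Int} (x : Int) (hlen : xs.length = V)
    (h1 : -(V : Int) ≤ i) (h2 : i < (V : Int)) :
    PySem.List.pySetD xs i x = xs.set (nrmN V i) x := by
  unfold nrmN
  simp only [PySem.List.pySetD, PySem.List.pySet?, PySem.List.pyIdx?, hlen]
  split_ifs with h3 <;> simp_all

theorem length_maskL (dist : List Int) : (maskL dist).length = dist.length := by simp [maskL]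

theorem maskL_getD {dist : List Int} {j : Nat} (h : j < dist.length) :
    (maskL dist).getD j 0 = if dist.getD j 0 = -1 then 0 else 1 := by
  unfold maskL
  rw [List.getD_eq_getElem _ _ (by simpa using h), List.getD_eq_getElem _ _ h]
  simp

theorem maskL_set {dist : List Int} {j : Nat} {e : Int} (he : e ≠ -1) :
    maskL (dist.set j e) = (maskL dist).set j 1 := by
  unfold maskL
  rw [List.map_set]
  simp [he]

theorem getD_set_ne {xs : List Int} {i j : Nat} {a d : Int} (h : i ≠ j) :
    (xs.set i a).getD j d = xs.getD j d := by
  by_cases hj : j < xs.length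
  · rw [List.getD_eq_getElem _ _ (by simpa using hj), List.getD_eq_getElem _ _ hj,
      List.getElem_set, if_neg h]
  · rw [List.getD_eq_default, List.getD_eq_default] <;> simp at hj ⊢ <;> omega

theorem getD_set_self {xs : List Int} {j : Nat} {a d : Int} (h : j < xs.length) :
    (xs.set j a).getD j d = a := by
  rw [List.getD_eq_getElem _ _ (by simpa using h)]
  simp

theorem cntN_set {dist : List Int} {j : Nat} {e : Int} (h : j < dist.length)
    (hj : dist.getD j 0 = -1) (he : e ≠ -1) : cntN (dist.set j e) + 1 = cntN dist := by
  unfold cntN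
  rw [List.countP_set h]
  rw [List.getD_eq_getElem _ _ h] at hj
  have : 0 < dist.countP (fun x => decide (x = -1)) := by
    rw [List.countP_pos_iff]
    exact ⟨dist[j], List.getElem_mem h, by simp [hj]⟩
  simp [hj, he]
  omega


theorem loopA_nil (g : List (List Int)) (v : Int) (k : Nat) (vis dist : List Int) :
    bfsLoopA g v k [] vis dist = dist := by
  cases k <;> rfl

theorem loopB_nil (g : List (List Int)) (v : Int) (k : Nat) (d : Int) (dist : List Int) :
    bfsAltLoop g v k [] d dist = dist := by
  cases k <;> rfl

-- A's inner scan for one dequeued vertex u runs in lockstep with B's inner scan for u: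
-- the visited array is the mask of the distance array and A's queue tail trails B's nxt list
theorem foldAB (g : List (List Int)) (V : Nat) (e : Int) (he : 1 ≤ e) (u : Int)
    (l : List Int) (hl : ∀ vz ∈ l, 0 ≤ vz ∧ vz < (V : Int)) (base : List Int) :
    ∀ (dist nxt0 : List Int), dist.length = V → -(V : Int) ≤ u → u < (V : Int) →
      dist.getD (nrmN V u) 0 = e - 1 →
      l.foldl (bfsStepA g u) (maskL dist, dist, base ++ nxt0)
        = (maskL (l.foldl (bfsAltStep (PySem.List.pyGetD g u []) e) (dist, nxt0)).1,
           (l.foldl (bfsAltStep (PySem.List.pyGetD g u []) e) (dist, nxt0)).1,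
           base ++ (l.foldl (bfsAltStep (PySem.List.pyGetD g u []) e) (dist, nxt0)).2) := by
  induction l with
  | nil => exact fun dist nxt0 _ _ _ _ => rfl
  | cons vz l' ih =>
    intro dist nxt0 hlen hu1 hu2 hdu
    obtain ⟨hvz0, hvzV⟩ := hl vz List.mem_cons_self
    have hlt : -(V : Int) ≤ vz := by omega
    have hj0 : vz.toNat < V := by omega
    have hl' : ∀ x ∈ l', 0 ≤ x ∧ x < (V : Int) := fun x hx => hl x (List.mem_cons_of_mem _ hx)
    have hgetd : PySem.List.pyGetD dist vz 0 = dist.getD vz.toNat 0 := by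
      rw [pyGetD_nrm 0 hlen hlt hvzV, nrmN_of_nonneg V hvz0]
    have hgetm : PySem.List.pyGetD (maskL dist) vz 0
        = if dist.getD vz.toNat 0 = -1 then 0 else 1 := by
      rw [pyGetD_nrm 0 (by rw [length_maskL, hlen]) hlt hvzV, nrmN_of_nonneg V hvz0]
      exact maskL_getD (by omega)
    have hgu : PySem.List.pyGetD dist u 0 = e - 1 := by
      rw [pyGetD_nrm 0 hlen hu1 hu2]; exact hdu
    simp only [List.foldl_cons, bfsStepA, bfsAltStep]
    by_cases hc : PySem.List.pyGetD dist vz 0 = -1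
        ∧ PySem.List.pyGetD (PySem.List.pyGetD g u []) vz 0 = 1
    · have hcell : dist.getD vz.toNat 0 = -1 := by rw [← hgetd]; exact hc.1
      rw [if_pos (⟨by rw [hgetm, if_pos hcell], hc.2⟩ : _ ∧ _), if_pos hc]
      have hsetd : PySem.List.pySetD dist vz (PySem.List.pyGetD dist u 0 + 1)
          = dist.set vz.toNat e := by
        rw [hgu, show e - 1 + 1 = e by ring, pySetD_nrm e hlen hlt hvzV, nrmN_of_nonneg V hvz0]
      have hsetm : PySem.List.pySetD (maskL dist) vz 1 = maskL (dist.set vz.toNat e) := by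
        rw [pySetD_nrm 1 (by rw [length_maskL, hlen]) hlt hvzV, nrmN_of_nonneg V hvz0,
          maskL_set (by omega)]
      have hsetd' : PySem.List.pySetD dist vz e = dist.set vz.toNat e := by
        rw [pySetD_nrm e hlen hlt hvzV, nrmN_of_nonneg V hvz0]
      simp only [hsetd, hsetm, hsetd', List.append_assoc]
      exact ih hl' (dist.set vz.toNat e) (nxt0 ++ [vz]) (by simpa using hlen) hu1 hu2
        (by
          have : vz.toNat ≠ nrmN V u := by
            intro hEq
            rw [← hEq, hcell] at hdu; omega
          rw [getD_set_ne this]; exact hdu)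
    · rw [if_neg (fun h => hc ⟨by
          have := h.1
          rw [hgetm] at this
          split at this
          · rwa [hgetd]
          · exact absurd this (by norm_num), h.2⟩), if_neg hc]
      exact ih hl' dist nxt0 hlen hu1 hu2 hdu

-- properties of B's inner scan for one source vertex: lengths, preservation of known distances,
-- the next-frontier invariant, and the count of undiscovered cells
theorem foldB_props (row : List Int) (V : Nat) (e : Int) (he : 0 ≤ e)
    (l : List Int) (hl : ∀ vz ∈ l, 0 ≤ vz ∧ vz < (V : Int)) :
    ∀ (dist nxt0 : List Int), dist.length = V →
      (l.foldl (bfsAltStep row e) (dist, nxt0)).1.length = V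
      ∧ (∀ j : Nat, j < V → dist.getD j 0 ≠ -1 →
          (l.foldl (bfsAltStep row e) (dist, nxt0)).1.getD j 0 = dist.getD j 0)
      ∧ (GoodN V dist e nxt0 →
          GoodN V (l.foldl (bfsAltStep row e) (dist, nxt0)).1 e (l.foldl (bfsAltStep row e) (dist, nxt0)).2)
      ∧ cntN (l.foldl (bfsAltStep row e) (dist, nxt0)).1 + (l.foldl (bfsAltStep row e) (dist, nxt0)).2.length
          = cntN dist + nxt0.length := by
  induction l with
  | nil => exact fun dist nxt0 hlen => ⟨hlen, fun _ _ _ => rfl, fun h => h, rfl⟩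
  | cons vz l' ih =>
    intro dist nxt0 hlen
    obtain ⟨hvz0, hvzV⟩ := hl vz List.mem_cons_self
    have hlt : -(V : Int) ≤ vz := by omega
    have hj0 : vz.toNat < V := by omega
    have hget : PySem.List.pyGetD dist vz 0 = dist.getD vz.toNat 0 := by
      rw [pyGetD_nrm 0 hlen hlt hvzV, nrmN_of_nonneg V hvz0]
    have hset : PySem.List.pySetD dist vz e = dist.set vz.toNat e := by
      rw [pySetD_nrm e hlen hlt hvzV, nrmN_of_nonneg V hvz0]
    have hl' : ∀ x ∈ l', 0 ≤ x ∧ x < (V : Int) := fun x hx => hl x (List.mem_cons_of_mem _ hx)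
    simp only [List.foldl_cons, bfsAltStep]
    by_cases hc : PySem.List.pyGetD dist vz 0 = -1 ∧ PySem.List.pyGetD row vz 0 = 1
    · rw [if_pos hc]
      have hcell : dist.getD vz.toNat 0 = -1 := by rw [← hget]; exact hc.1
      have hlen' : (dist.set vz.toNat e).length = V := by simpa using hlen
      obtain ⟨ih1, ih2, ih3, ih4⟩ := ih hl' (dist.set vz.toNat e) (nxt0 ++ [vz]) hlen'
      simp only [hset]
      refine ⟨ih1, ?_, ?_, ?_⟩
      · intro j hj hne
        have hjne : vz.toNat ≠ j := by
          intro hEq; rw [hEq] at hcell; exact hne hcell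
        rw [ih2 j hj (by rwa [getD_set_ne hjne]), getD_set_ne hjne]
      · intro hN
        refine ih3 ?_
        intro w hw
        rcases List.mem_append.mp hw with hw | hw
        · obtain ⟨hw0, hwV, hwd⟩ := hN w hw
          have : vz.toNat ≠ w.toNat := by
            intro hEq; rw [hEq, hwd] at hcell; omega
          exact ⟨hw0, hwV, by rw [getD_set_ne this, hwd]⟩
        · rcases List.mem_singleton.mp hw with rfl
          exact ⟨hvz0, hvzV, getD_set_self (by omega)⟩
      · have hcnt : cntN (dist.set vz.toNat e) + 1 = cntN dist :=
          cntN_set (by omega) hcell (by omega)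
        simp only [List.length_append, List.length_singleton] at ih4 ⊢
        omega
    · rw [if_neg hc]
      exact ih hl' dist nxt0 hlen

-- the same properties for a whole level (B's 'for u in frontier' loop)
theorem levelB_props (g : List (List Int)) (V : Nat) (e : Int) (he : 1 ≤ e) (f : List Int) :
    ∀ (dist nxt0 : List Int), dist.length = V → GoodF V dist (e - 1) f →
      (bfsAltLevel g (V : Int) e (dist, nxt0) f).1.length = V
      ∧ (∀ j : Nat, j < V → dist.getD j 0 ≠ -1 →
          (bfsAltLevel g (V : Int) e (dist, nxt0) f).1.getD j 0 = dist.getD j 0)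
      ∧ (GoodN V dist e nxt0 →
          GoodN V (bfsAltLevel g (V : Int) e (dist, nxt0) f).1 e (bfsAltLevel g (V : Int) e (dist, nxt0) f).2)
      ∧ cntN (bfsAltLevel g (V : Int) e (dist, nxt0) f).1 + (bfsAltLevel g (V : Int) e (dist, nxt0) f).2.length
          = cntN dist + nxt0.length := by
  induction f with
  | nil => exact fun dist nxt0 hlen _ => ⟨hlen, fun _ _ _ => rfl, fun h => h, rfl⟩
  | cons u f' ih =>
    intro dist nxt0 hlen hf
    obtain ⟨hu1, hu2, hud⟩ := hf u List.mem_cons_self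
    have hf' : GoodF V dist (e - 1) f' := fun x hx => hf x (List.mem_cons_of_mem _ hx)
    have hrange : ∀ vz ∈ PySem.List.pyRange 0 (V : Int), 0 ≤ vz ∧ vz < (V : Int) := by
      intro vz hvz; exact PySem.List.mem_pyRange_one.mp hvz
    obtain ⟨p1, p2, p3, p4⟩ := foldB_props (PySem.List.pyGetD g u []) V e (by omega)
      (PySem.List.pyRange 0 (V : Int)) hrange dist nxt0 hlen
    set s1 := (PySem.List.pyRange 0 (V : Int)).foldl
      (bfsAltStep (PySem.List.pyGetD g u []) e) (dist, nxt0) with hs1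
    have hstep : bfsAltLevel g (V : Int) e (dist, nxt0) (u :: f')
        = bfsAltLevel g (V : Int) e s1 f' := by
      simp only [bfsAltLevel, List.foldl_cons, hs1]
    have hgood' : GoodF V s1.1 (e - 1) f' := by
      intro x hx
      obtain ⟨hx1, hx2, hxd⟩ := hf' x hx
      exact ⟨hx1, hx2, by rw [p2 (nrmN V x) (nrmN_lt hx1 hx2) (by rw [hxd]; omega), hxd]⟩
    obtain ⟨q1, q2, q3, q4⟩ := ih s1.1 s1.2 p1 hgood'
    rw [hstep]
    have hs1' : (s1.1, s1.2) = s1 := rfl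
    rw [hs1'] at q1 q2 q3 q4
    refine ⟨q1, ?_, ?_, ?_⟩
    · intro j hj hne
      rw [q2 j hj (by rw [p2 j hj hne]; exact hne), p2 j hj hne]
    · exact fun hN => q3 (p3 hN)
    · omega

-- queue splitting: A's one-at-a-time queue processing of a whole level equals B's level sweep
theorem loopA_level (g : List (List Int)) (V : Nat) (d : Int) (hd : 0 ≤ d) (f : List Int) :
    ∀ (n : Nat) (dist nxt0 : List Int), dist.length = V → GoodF V dist d f →
      GoodN V dist (d + 1) nxt0 →
      bfsLoopA g (V : Int) (n + f.length) (f ++ nxt0) (maskL dist) dist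
        = bfsLoopA g (V : Int) n (bfsAltLevel g (V : Int) (d + 1) (dist, nxt0) f).2
            (maskL (bfsAltLevel g (V : Int) (d + 1) (dist, nxt0) f).1)
            (bfsAltLevel g (V : Int) (d + 1) (dist, nxt0) f).1 := by
  induction f with
  | nil => intro n dist nxt0 _ _ _; simp [bfsAltLevel]
  | cons u f' ih =>
    intro n dist nxt0 hlen hf hN
    obtain ⟨hu1, hu2, hud⟩ := hf u List.mem_cons_self
    have hf' : GoodF V dist d f' := fun x hx => hf x (List.mem_cons_of_mem _ hx)
    have hrange : ∀ vz ∈ PySem.List.pyRange 0 (V : Int), 0 ≤ vz ∧ vz < (V : Int) := by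
      intro vz hvz; exact PySem.List.mem_pyRange_one.mp hvz
    have hAB := foldAB g V (d + 1) (by omega) u (PySem.List.pyRange 0 (V : Int)) hrange f'
      dist nxt0 hlen hu1 hu2 (by rw [hud]; ring)
    obtain ⟨p1, p2, p3, p4⟩ := foldB_props (PySem.List.pyGetD g u []) V (d + 1) (by omega)
      (PySem.List.pyRange 0 (V : Int)) hrange dist nxt0 hlen
    set s1 := (PySem.List.pyRange 0 (V : Int)).foldl
      (bfsAltStep (PySem.List.pyGetD g u []) (d + 1)) (dist, nxt0) with hs1
    have hstep : bfsAltLevel g (V : Int) (d + 1) (dist, nxt0) (u :: f')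
        = bfsAltLevel g (V : Int) (d + 1) s1 f' := by
      simp only [bfsAltLevel, List.foldl_cons, hs1]
    have hlen1 : n + (u :: f').length = (n + f'.length) + 1 := by
      simp only [List.length_cons]; omega
    rw [hstep, hlen1]
    simp only [List.cons_append, bfsLoopA, hAB]
    have hgood' : GoodF V s1.1 d f' := by
      intro x hx
      obtain ⟨hx1, hx2, hxd⟩ := hf' x hx
      exact ⟨hx1, hx2, by rw [p2 (nrmN V x) (nrmN_lt hx1 hx2) (by rw [hxd]; omega), hxd]⟩
    have := ih n s1.1 s1.2 p1 hgood' (p3 hN)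
    simpa using this

-- the two whole loops agree, with the exact fuel accounting cntN dist + |frontier|
theorem loopAB (g : List (List Int)) (V : Nat) :
    ∀ (nB : Nat) (f dist : List Int) (d : Int), 0 ≤ d → dist.length = V →
      GoodF V dist d f → cntN dist < nB →
      bfsLoopA g (V : Int) (cntN dist + f.length) f (maskL dist) dist
        = bfsAltLoop g (V : Int) nB f d dist := by
  intro nB
  induction nB with
  | zero => intro f dist d _ _ _ h; omega
  | succ m ih =>
    intro f dist d hd hlen hf hcnt
    match f with
    | [] => rw [loopA_nil, loopB_nil]
    | u :: f' =>
      have hlev := loopA_level g V d hd (u :: f') (cntN dist) dist [] hlen hf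
        (by intro w hw; simp at hw)
      simp only [List.append_nil] at hlev
      set s := bfsAltLevel g (V : Int) (d + 1) (dist, []) (u :: f') with hs
      obtain ⟨p1, p2, p3, p4⟩ := levelB_props g V (d + 1) (by omega) (u :: f') dist [] hlen
        (by simpa using hf)
      have hsN : GoodN V s.1 (d + 1) s.2 := p3 (by intro w hw; simp at hw)
      have hloopB : bfsAltLoop g (V : Int) (m + 1) (u :: f') d dist
          = bfsAltLoop g (V : Int) m s.2 (d + 1) s.1 := by
        simp only [bfsAltLoop, hs]
      rw [hloopB, hlev]
      rw [← hs] at p1 p4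
      simp only [List.length_nil, Nat.add_zero] at p4
      cases hN : s.2 with
      | nil => rw [loopA_nil, loopB_nil]
      | cons w ws =>
        rw [hN] at p4 hsN
        simp only [List.length_cons] at p4
        have hlt : cntN s.1 < m := by omega
        have hfin := ih (w :: ws) s.1 (d + 1) (by omega) p1
          (fun x hx => by
            obtain ⟨hx0, hxV, hxd⟩ := hsN x hx
            exact ⟨by omega, hxV, by rw [nrmN_of_nonneg V hx0]; exact hxd⟩)
          hlt
        rw [show cntN dist = cntN s.1 + (w :: ws).length by simp only [List.length_cons]; omega]
        exact hfin

-- ===== VERDICT (by name: the statement is the Claim_ definition above) =====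
theorem cntN_replicate (V : Nat) : cntN (List.replicate V (-1 : Int)) = V := by
  unfold cntN
  induction V with
  | zero => rfl
  | succ n ih => simp [List.replicate_succ, ih]

theorem bfs_spec : Claim_equal_bfs := by
  intro o g v p _ hpre
  obtain ⟨hv, ho1, ho2, _, _⟩ := hpre
  unfold Spec_bfs bfs bfs_alt
  have hvV : ((v.toNat : Nat) : Int) = v := Int.toNat_of_nonneg (by omega)
  rw [← hvV]
  set V : Nat := v.toNat with hVdef
  simp only [Int.toNat_natCast]
  have hV1 : 1 ≤ V := by omega
  have hoV1 : -(V : Int) ≤ o := by omega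
  have hoV2 : o < (V : Int) := by omega
  have hj : nrmN V o < V := nrmN_lt hoV1 hoV2
  set j : Nat := nrmN V o with hjdef
  have hsetd : PySem.List.pySetD (List.replicate V (-1 : Int)) o 0
      = (List.replicate V (-1 : Int)).set j 0 :=
    pySetD_nrm 0 (by simp) hoV1 hoV2
  have hsetv : PySem.List.pySetD (List.replicate V (0 : Int)) o 1
      = (List.replicate V (0 : Int)).set j 1 :=
    pySetD_nrm 1 (by simp) hoV1 hoV2
  set dist0 : List Int := (List.replicate V (-1 : Int)).set j 0 with hd0
  have hmask0 : maskL (List.replicate V (-1 : Int)) = List.replicate V 0 := by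
    unfold maskL
    simp
  have hmask : (List.replicate V (0 : Int)).set j 1 = maskL dist0 := by
    rw [hd0, maskL_set (by norm_num), hmask0]
  have hlen0 : dist0.length = V := by simp [hd0]
  have hrepj : (List.replicate V (-1 : Int)).getD j 0 = -1 := by
    rw [List.getD_eq_getElem _ _ (by simpa using hj)]; simp
  have hcnt : cntN dist0 + 1 = V := by
    rw [hd0, cntN_set (by simpa using hj) hrepj (by norm_num), cntN_replicate]
  have hgood : GoodF V dist0 0 [o] := by
    intro u hu
    rcases List.mem_singleton.mp hu with rfl
    exact ⟨hoV1, hoV2, by rw [hd0, ← hjdef]; exact getD_set_self (by simpa using hj)⟩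
  have hloops : bfsLoopA g (V : Int) V [o]
        (PySem.List.pySetD (List.replicate V (0 : Int)) o 1)
        (PySem.List.pySetD (List.replicate V (-1 : Int)) o 0)
      = bfsAltLoop g (V : Int) V [o] 0
        (PySem.List.pySetD (List.replicate V (-1 : Int)) o 0) := by
    rw [hsetd, hsetv, hmask]
    have hmain := loopAB g V V [o] dist0 0 le_rfl hlen0 hgood (by omega)
    rw [List.length_singleton] at hmain
    rwa [show cntN dist0 + 1 = V from by omega] at hmain
  simp only [hloops]
  rfl
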